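-- pv_equiv track=rewrite | github.com/litakgit/DSAlgo | Random/longest_sub_array_with_diff_any_2_lt_k.py | get_sub_array_any_2_diff_less_than
-- ===== SOURCE A (Python) =====
-- import collections
--
-- def get_sub_array_any_2_diff_less_than(A, k):
--     def add_elem_in_min_max_qs(elem):
--         while min_q and min_q[-1] > elem:
--             min_q.pop()
--         min_q.append(elem)
--
--         while max_q and max_q[-1] < elem:
--             max_q.pop()
--         max_q.append(elem)
--
--     def delete_elem_from_min_max_qs(elem):
--         if min_q[0] == elem:
--             min_q.popleft()
--         if max_q[0] == elem:
--             max_q.popleft()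
--
--
--     min_q = collections.deque()
--     max_q = collections.deque()
--     largest_sub_array = (0, (-1,-1))
--     start = 0
--
--     for end, elem in enumerate(A):
--         add_elem_in_min_max_qs(elem)
--         while max_q[0] - min_q[0] >= k:
--             largest_sub_array = max(largest_sub_array, (end-start,(start, end-1)), key=lambda x : x[0])
--             delete_elem_from_min_max_qs(A[start])
--             start += 1
--     largest_sub_array = max(largest_sub_array, (end-start+1,(start, end)), key=lambda x : x[0])
--
--     return largest_sub_array
-- ===== SOURCE B (Python) =====
-- def get_sub_array_any_2_diff_less_than(A, k):
--     best = (0, (-1, -1))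
--     start = 0
--     for end in range(len(A)):
--         while max(A[start:end + 1]) - min(A[start:end + 1]) >= k:
--             if end - start > best[0]:
--                 best = (end - start, (start, end - 1))
--             start += 1
--     if end - start + 1 > best[0]:
--         best = (end - start + 1, (start, end))
--     return best
-- ===== Notes on version B (the rewrite author's own statement) =====
-- stated objective: simpler
-- what changed: The two monotonic deques and their push/pop-front maintenance are removed entirely; B keeps only (best, start) and reads the window's extremes directly with min()/max() over the current slice inside the same sliding-window shrink loop.
import Mathlib
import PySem

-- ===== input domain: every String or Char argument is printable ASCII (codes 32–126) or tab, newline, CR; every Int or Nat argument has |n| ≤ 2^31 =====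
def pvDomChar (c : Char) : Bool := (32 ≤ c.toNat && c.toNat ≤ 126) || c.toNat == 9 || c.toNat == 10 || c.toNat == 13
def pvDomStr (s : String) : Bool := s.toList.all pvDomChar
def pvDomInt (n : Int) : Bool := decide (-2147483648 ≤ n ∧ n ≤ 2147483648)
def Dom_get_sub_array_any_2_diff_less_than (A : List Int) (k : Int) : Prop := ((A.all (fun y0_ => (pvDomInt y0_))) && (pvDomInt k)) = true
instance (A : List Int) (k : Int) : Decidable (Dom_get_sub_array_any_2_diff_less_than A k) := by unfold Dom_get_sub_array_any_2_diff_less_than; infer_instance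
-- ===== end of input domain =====

-- B removes A's two monotonic deques and reads the window extremes directly with min/max of
-- the current slice inside the same sliding-window loop (objective: simpler).


-- ===== PORT A =====
-- 'while min_q and min_q[-1] > elem: min_q.pop(); min_q.append(elem)' — the right-pop while
-- loop is dropWhile from the right end (exact).
def pvPushMin (q : List Int) (e : Int) : List Int :=
  (q.reverse.dropWhile (fun x => decide (e < x))).reverse ++ [e]

-- same for max_q: 'while max_q and max_q[-1] < elem: max_q.pop(); max_q.append(elem)'
def pvPushMax (q : List Int) (e : Int) : List Int :=
  (q.reverse.dropWhile (fun x => decide (x < e))).reverse ++ [e]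

-- the inner 'while max_q[0] - min_q[0] >= k' loop; fuel = len(A) always suffices under
-- Pre_; an empty deque or A[start] out of range is a Python IndexError (excluded by Pre_).
def pvShrinkA (A : List Int) (k : Int) (endi : Nat) :
    Nat → List Int → List Int → (Int × (Int × Int)) → Nat →
    (List Int × List Int × (Int × (Int × Int)) × Nat)
  | 0, minq, maxq, best, start => (minq, maxq, best, start)
  | fuel+1, minq, maxq, best, start =>
    match maxq.head?, minq.head? with
    | some M, some m =>
      if k ≤ M - m then
        -- largest_sub_array = max(largest_sub_array, (end-start,(start,end-1)), key=x[0])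
        let cand : Int × (Int × Int) := ((endi : Int) - (start : Int), ((start : Int), (endi : Int) - 1))
        let best' := if best.1 < cand.1 then cand else best
        match A[start]? with
        | some a =>
            pvShrinkA A k endi fuel
              (if minq.head? = some a then minq.tail else minq)
              (if maxq.head? = some a then maxq.tail else maxq)
              best' (start+1)
        | none => (minq, maxq, best', start)   -- IndexError; unreachable under Pre_
      else (minq, maxq, best, start)
    | _, _ => (minq, maxq, best, start)        -- IndexError on empty deque; unreachable under Pre_

-- 'for end, elem in enumerate(A)': structural recursion carrying the enumerate counter
def pvLoopA (A : List Int) (k : Int) :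
    List Int → Nat → (List Int × List Int × (Int × (Int × Int)) × Nat) →
    (List Int × List Int × (Int × (Int × Int)) × Nat)
  | [], _, s => s
  | e :: rest, i, (minq, maxq, best, start) =>
      pvLoopA A k rest (i+1) (pvShrinkA A k i A.length (pvPushMin minq e) (pvPushMax maxq e) best start)

def get_sub_array_any_2_diff_less_than (A : List Int) (k : Int) : Int × (Int × Int) :=
  match A with
  | [] => (0, (-1, -1))   -- Python raises NameError ('end' unbound); excluded by Pre_
  | _ :: _ =>
    let s := pvLoopA A k A 0 ([], [], (0, (-1, -1)), 0)
    let best := s.2.2.1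
    let start := s.2.2.2
    let endi : Int := (A.length : Int) - 1
    let cand : Int × (Int × Int) := (endi - (start : Int) + 1, ((start : Int), endi))
    if best.1 < cand.1 then cand else best

-- ===== PORT B =====
-- 'while max(A[start:end+1]) - min(A[start:end+1]) >= k' (fuel = len(A) suffices under Pre_;
-- min/max of an empty slice is a Python ValueError, excluded by Pre_)
def pvShrinkB (A : List Int) (k : Int) (endi : Nat) :
    Nat → (Int × (Int × Int)) → Nat → ((Int × (Int × Int)) × Nat)
  | 0, best, start => (best, start)
  | fuel+1, best, start =>
    let w := PySem.List.slice A (some (start : Int)) (some ((endi : Int) + 1))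
    match PySem.List.max? w (fun x => x), PySem.List.min? w (fun x => x) with
    | some M, some m =>
      if k ≤ M - m then
        let best' := if best.1 < (endi : Int) - (start : Int) then
            ((endi : Int) - (start : Int), ((start : Int), (endi : Int) - 1)) else best
        pvShrinkB A k endi fuel best' (start+1)
      else (best, start)
    | _, _ => (best, start)

-- 'for end in range(len(A))'
def pvLoopB (A : List Int) (k : Int) :
    List Nat → (Int × (Int × Int)) → Nat → ((Int × (Int × Int)) × Nat)
  | [], best, start => (best, start)
  | i :: rest, best, start =>
      let r := pvShrinkB A k i A.length best start
      pvLoopB A k rest r.1 r.2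

def get_sub_array_any_2_diff_less_than_alt (A : List Int) (k : Int) : Int × (Int × Int) :=
  match A with
  | [] => (0, (-1, -1))   -- Python raises NameError ('end' unbound); excluded by Pre_
  | _ :: _ =>
    let r := pvLoopB A k (List.range A.length) (0, (-1, -1)) 0
    let endi : Int := (A.length : Int) - 1
    if r.1.1 < endi - (r.2 : Int) + 1 then (endi - (r.2 : Int) + 1, ((r.2 : Int), endi)) else r.1

-- ===== PRECONDITION & SPEC =====
-- Pre_ excludes exactly the inputs on which the Python A raises: the empty list (NameError:
-- 'end' is unbound at the final line) and k ≤ 0 (the window is shrunk until the deques are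
-- empty and max_q[0] raises IndexError).  B raises on the same inputs.
def Pre_get_sub_array_any_2_diff_less_than (A : List Int) (k : Int) : Prop := A ≠ [] ∧ 1 ≤ k
instance (A : List Int) (k : Int) : Decidable (Pre_get_sub_array_any_2_diff_less_than A k) := by
  unfold Pre_get_sub_array_any_2_diff_less_than; infer_instance

def pvWitness_get_sub_array_any_2_diff_less_than : List Int × Int := ([3, 1, 4, 1, 5], 3)

def Spec_get_sub_array_any_2_diff_less_than (A : List Int) (k : Int) (out : Int × (Int × Int)) : Prop := out = get_sub_array_any_2_diff_less_than_alt A k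
instance (A : List Int) (k : Int) (out : Int × (Int × Int)) : Decidable (Spec_get_sub_array_any_2_diff_less_than A k out) := by unfold Spec_get_sub_array_any_2_diff_less_than; infer_instance

-- ===== CLAIM (what is proved, stated in full; the proofs are below) =====
def Claim_equal_get_sub_array_any_2_diff_less_than : Prop := ∀ (A : List Int) (k : Int), Dom_get_sub_array_any_2_diff_less_than A k → Pre_get_sub_array_any_2_diff_less_than A k → Spec_get_sub_array_any_2_diff_less_than A k (get_sub_array_any_2_diff_less_than A k)

-- ===== LEMMAS AND PROOFS =====

-- the contents of a monotonic deque over window w: the elements that are le-below their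
-- whole suffix (for le = ≤ this is min_q, for le = ≥ it is max_q)
def pvDeq (le : Int → Int → Bool) : List Int → List Int
  | [] => []
  | x :: xs => if xs.all (fun y => le x y) then x :: pvDeq le xs else pvDeq le xs

theorem pvDeq_subset (le : Int → Int → Bool) (w : List Int) :
    ∀ x ∈ pvDeq le w, x ∈ w := by
  induction w with
  | nil => simp [pvDeq]
  | cons a t ih =>
    intro x hx
    by_cases h : t.all (fun y => le a y) <;> simp [pvDeq, h] at hx
    · rcases hx with h1 | h2
      · simp [h1]
      · exact List.mem_cons_of_mem _ (ih x h2)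
    · exact List.mem_cons_of_mem _ (ih x hx)

theorem pvDeq_head (le : Int → Int → Bool)
    (htot : ∀ a b, le a b = true ∨ le b a = true)
    (htr : ∀ a b c, le a b = true → le b c = true → le a c = true) :
    ∀ (w : List Int), w ≠ [] →
      ∃ h t, pvDeq le w = h :: t ∧ h ∈ w ∧ ∀ y ∈ w, le h y = true := by
  intro w
  induction w with
  | nil => intro h; exact absurd rfl h
  | cons a t ih =>
    intro _
    by_cases hall : t.all (fun y => le a y)
    · refine ⟨a, pvDeq le t, by simp [pvDeq, hall], by simp, ?_⟩
      intro y hy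
      rcases List.mem_cons.1 hy with rfl | hy
      · rcases htot y y with h | h <;> exact h
      · exact (List.all_eq_true.1 hall) y hy
    · have ht : t ≠ [] := by
        rintro rfl; simp at hall
      obtain ⟨h, tl, heq, hmem, hle⟩ := ih ht
      refine ⟨h, tl, by simp [pvDeq, hall, heq], List.mem_cons_of_mem _ hmem, ?_⟩
      intro y hy
      rcases List.mem_cons.1 hy with rfl | hy
      · obtain ⟨z, hz, hnz⟩ := by
          simpa [List.all_eq_true] using hall
        rcases htot y z with h1 | h1
        · exact absurd h1 (by simp [hnz])
        · exact htr h z y (hle z hz) h1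
      · exact hle y hy

-- pushing e: the Python right-pop while loop applied to pvDeq le w yields pvDeq le (w ++ [e])
theorem pvDeq_push (le : Int → Int → Bool) (p : Int → Bool) (e : Int)
    (htr : ∀ a b c, le a b = true → le b c = true → le a c = true)
    (hp : ∀ x, p x = !(le x e)) :
    ∀ (w : List Int),
      pvDeq le (w ++ [e]) = ((pvDeq le w).reverse.dropWhile p).reverse ++ [e] := by
  intro w
  induction w with
  | nil => simp [pvDeq]
  | cons a t ih =>
    by_cases hall : t.all (fun y => le a y)
    · by_cases hae : le a e
      · have hall' : (t ++ [e]).all (fun y => le a y) = true := by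
          simp [List.all_append, hall, hae]
        have hpa : p a = false := by simp [hp, hae]
        have hstep : ((pvDeq le t).reverse ++ [a]).dropWhile p
            = (pvDeq le t).reverse.dropWhile p ++ [a] := by
          rw [List.dropWhile_append]
          by_cases hemp : ((pvDeq le t).reverse.dropWhile p).isEmpty
          · simp [hemp, List.dropWhile, hpa]
            simpa using hemp
          · simp [hemp]
        calc pvDeq le ((a :: t) ++ [e])
            = a :: pvDeq le (t ++ [e]) := by simp [pvDeq, hall']
          _ = a :: (((pvDeq le t).reverse.dropWhile p).reverse ++ [e]) := by rw [ih]
          _ = (((pvDeq le t).reverse ++ [a]).dropWhile p).reverse ++ [e] := by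
              rw [hstep]; simp
          _ = ((pvDeq le (a :: t)).reverse.dropWhile p).reverse ++ [e] := by
              simp [pvDeq, hall]
      · -- a > e: everything in the deque (all ≥ a) gets popped
        have hall' : ¬ (t ++ [e]).all (fun y => le a y) = true := by
          simp [List.all_append]
          intro _; simpa using hae
        have hdropall : ∀ q : List Int, (∀ x ∈ q, le a x = true) →
            (q.reverse ++ [a]).dropWhile p = [] ∧ q.reverse.dropWhile p = [] := by
          intro q hq
          have h1 : ∀ x ∈ q.reverse ++ [a], p x = true := by
            intro x hx
            rcases List.mem_append.1 hx with h | h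
            · have hlax : le a x = true := hq x (List.mem_reverse.1 h)
              have hxe : le x e = false := by
                by_contra h'
                exact absurd (htr a x e hlax (by simpa using h')) hae
              simp [hp, hxe]
            · simp at h; subst h
              have hxe : le x e = false := by
                by_contra h'
                exact absurd (by simpa using h' : le x e = true) hae
              simp [hp, hxe]
          constructor
          · exact List.dropWhile_eq_nil_iff.2 (fun x hx => h1 x hx)
          · exact List.dropWhile_eq_nil_iff.2 (fun x hx => h1 x (List.mem_append_left _ hx))
        have hq : ∀ x ∈ pvDeq le t, le a x = true := by
          intro x hx
          exact (List.all_eq_true.1 hall) x (pvDeq_subset le t x hx)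
        obtain ⟨h1, h2⟩ := hdropall (pvDeq le t) hq
        calc pvDeq le ((a :: t) ++ [e])
            = pvDeq le (t ++ [e]) := by simp [pvDeq, hall']
          _ = ((pvDeq le t).reverse.dropWhile p).reverse ++ [e] := ih
          _ = [e] := by rw [h2]; simp
          _ = (((pvDeq le t).reverse ++ [a]).dropWhile p).reverse ++ [e] := by rw [h1]; simp
          _ = ((pvDeq le (a :: t)).reverse.dropWhile p).reverse ++ [e] := by
              simp [pvDeq, hall]
    · have hall' : ¬ (t ++ [e]).all (fun y => le a y) = true := by
        simp [List.all_append]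
        intro h; exact absurd (List.all_eq_true.2 h) hall
      simp [pvDeq, hall, hall', ih]

-- deleting A[start] from the front: the Python 'if q[0] == elem: q.popleft()'
theorem pvDeq_delete (le : Int → Int → Bool)
    (htot : ∀ a b, le a b = true ∨ le b a = true)
    (htr : ∀ a b c, le a b = true → le b c = true → le a c = true)
    (x : Int) (rest : List Int) :
    (if (pvDeq le (x :: rest)).head? = some x then (pvDeq le (x :: rest)).tail
     else pvDeq le (x :: rest)) = pvDeq le rest := by
  by_cases hall : rest.all (fun y => le x y)
  · simp [pvDeq, hall]
  · have hne : pvDeq le (x :: rest) = pvDeq le rest := by simp [pvDeq, hall]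
    rw [hne]
    have hrest : rest ≠ [] := by rintro rfl; simp at hall
    obtain ⟨h, t, heq, hmem, hle⟩ := pvDeq_head le htot htr rest hrest
    obtain ⟨z, hz, hnz⟩ : ∃ z ∈ rest, ¬ le x z = true := by
      simpa [List.all_eq_true] using hall
    have hhx : h ≠ x := by
      rintro rfl
      exact hnz (hle z hz)
    simp [heq, hhx]

-- the window of the sliding loop
def pvWin (A : List Int) (s t : Nat) : List Int := (A.drop s).take (t - s)

def pvLeMin : Int → Int → Bool := fun a b => decide (a ≤ b)
def pvLeMax : Int → Int → Bool := fun a b => decide (b ≤ a)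

theorem pvLeMin_tot : ∀ a b, pvLeMin a b = true ∨ pvLeMin b a = true := by
  intro a b; simp only [pvLeMin, decide_eq_true_eq]; omega
theorem pvLeMin_tr : ∀ a b c, pvLeMin a b = true → pvLeMin b c = true → pvLeMin a c = true := by
  intro a b c; simp only [pvLeMin, decide_eq_true_eq]; omega
theorem pvLeMax_tot : ∀ a b, pvLeMax a b = true ∨ pvLeMax b a = true := by
  intro a b; simp only [pvLeMax, decide_eq_true_eq]; omega
theorem pvLeMax_tr : ∀ a b c, pvLeMax a b = true → pvLeMax b c = true → pvLeMax a c = true := by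
  intro a b c; simp only [pvLeMax, decide_eq_true_eq]; omega

theorem pvPushMin_deq (w : List Int) (e : Int) :
    pvPushMin (pvDeq pvLeMin w) e = pvDeq pvLeMin (w ++ [e]) := by
  rw [pvDeq_push pvLeMin (fun x => decide (e < x)) e pvLeMin_tr
    (by intro x
        by_cases h : x ≤ e
        · have : ¬ e < x := by omega
          simp [pvLeMin, h, this]
        · have : e < x := by omega
          simp [pvLeMin, h, this]) w]
  rfl

theorem pvPushMax_deq (w : List Int) (e : Int) :
    pvPushMax (pvDeq pvLeMax w) e = pvDeq pvLeMax (w ++ [e]) := by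
  rw [pvDeq_push pvLeMax (fun x => decide (x < e)) e pvLeMax_tr
    (by intro x
        by_cases h : e ≤ x
        · have : ¬ x < e := by omega
          simp [pvLeMax, h, this]
        · have : x < e := by omega
          simp [pvLeMax, h, this]) w]
  rfl

-- the B-side slice is the window
theorem pvSliceWin (A : List Int) (s endi : Nat) :
    PySem.List.slice A (some (s : Int)) (some ((endi : Int) + 1)) = pvWin A s (endi + 1) := by
  have : ((endi : Int) + 1) = ((endi + 1 : Nat) : Int) := by push_cast; ring
  rw [this, PySem.List.slice_natCast]
  rfl

-- head of min deque = Python min of the window, same for max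
theorem pvMinHead (w : List Int) (hw : w ≠ []) :
    ∃ m, (pvDeq pvLeMin w).head? = some m ∧ PySem.List.min? w (fun x => x) = some m := by
  obtain ⟨h, t, heq, hmem, hle⟩ := pvDeq_head pvLeMin pvLeMin_tot pvLeMin_tr w hw
  obtain ⟨m, hm⟩ : ∃ m, PySem.List.min? w (fun x => x) = some m := by
    cases hmm : PySem.List.min? w (fun x => x) with
    | none => exact absurd ((PySem.List.min?_eq_none_iff w (fun x => x)).1 hmm) hw
    | some m => exact ⟨m, rfl⟩
  have hmmem := PySem.List.min?_mem hm
  have hmin := PySem.List.min?_isMin hm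
  have h1 : h ≤ m := by simpa [pvLeMin] using hle m hmmem
  have h2 : m ≤ h := hmin h hmem
  have : h = m := le_antisymm h1 h2
  exact ⟨m, by simp [heq, this], hm⟩

theorem pvMaxHead (w : List Int) (hw : w ≠ []) :
    ∃ m, (pvDeq pvLeMax w).head? = some m ∧ PySem.List.max? w (fun x => x) = some m := by
  obtain ⟨h, t, heq, hmem, hle⟩ := pvDeq_head pvLeMax pvLeMax_tot pvLeMax_tr w hw
  obtain ⟨m, hm⟩ : ∃ m, PySem.List.max? w (fun x => x) = some m := by
    cases hmm : PySem.List.max? w (fun x => x) with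
    | none => exact absurd ((PySem.List.max?_eq_none_iff w (fun x => x)).1 hmm) hw
    | some m => exact ⟨m, rfl⟩
  have hmmem := PySem.List.max?_mem hm
  have hmax := PySem.List.max?_isMax hm
  have h1 : m ≤ h := by simpa [pvLeMax] using hle m hmmem
  have h2 : h ≤ m := hmax h hmem
  have : h = m := le_antisymm h2 h1
  exact ⟨m, by simp [heq, this], hm⟩

theorem pvWin_empty_iff (A : List Int) (s t : Nat) :
    pvWin A s t = [] ↔ (t ≤ s ∨ A.length ≤ s) := by
  simp [pvWin, List.take_eq_nil_iff, List.drop_eq_nil_iff]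
  omega

theorem pvWin_cons (A : List Int) (s t : Nat) (hst : s < t) (hs : s < A.length) :
    pvWin A s t = A[s] :: pvWin A (s+1) t := by
  unfold pvWin
  rw [List.drop_eq_getElem_cons hs]
  have : t - s = (t - (s+1)) + 1 := by omega
  rw [this, List.take_succ_cons]

theorem pvWin_snoc (A : List Int) (s i : Nat) (_hsi : s ≤ i) (hi : i < A.length) :
    pvWin A s (i+1) = pvWin A s i ++ [A[i]] := by
  unfold pvWin
  have h1 : i + 1 - s = (i - s) + 1 := by omega
  rw [h1, List.take_add_one]
  congr 1
  have : (A.drop s)[i - s]? = some A[i] := by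
    rw [List.getElem?_drop]
    have : s + (i - s) = i := by omega
    rw [this, List.getElem?_eq_getElem hi]
  simp [this]

-- the two shrink loops agree (and the deques track the window)
theorem pvShrink_eq (A : List Int) (k : Int) (endi : Nat) (_hend : endi < A.length) :
    ∀ (fuel : Nat) (best : Int × (Int × Int)) (start : Nat), start ≤ endi + 1 →
      pvShrinkA A k endi fuel (pvDeq pvLeMin (pvWin A start (endi+1)))
          (pvDeq pvLeMax (pvWin A start (endi+1))) best start
        = (pvDeq pvLeMin (pvWin A (pvShrinkB A k endi fuel best start).2 (endi+1)),
           pvDeq pvLeMax (pvWin A (pvShrinkB A k endi fuel best start).2 (endi+1)),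
           (pvShrinkB A k endi fuel best start).1,
           (pvShrinkB A k endi fuel best start).2)
      ∧ start ≤ (pvShrinkB A k endi fuel best start).2
      ∧ (pvShrinkB A k endi fuel best start).2 ≤ endi + 1 := by
  intro fuel
  induction fuel with
  | zero => intro best start hs; exact ⟨rfl, le_refl _, hs⟩
  | succ fuel ih =>
    intro best start hs
    by_cases hw : pvWin A start (endi+1) = []
    · -- empty window: deques empty, both loops stop
      rw [pvShrinkB]
      rw [pvSliceWin]
      have hmin : PySem.List.min? (pvWin A start (endi+1)) (fun x => x) = none := by
        exact (PySem.List.min?_eq_none_iff _ _).2 hw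
      have hmax : PySem.List.max? (pvWin A start (endi+1)) (fun x => x) = none := by
        exact (PySem.List.max?_eq_none_iff _ _).2 hw
      have hmin0 : PySem.List.min? ([] : List Int) (fun x => x) = none :=
        (PySem.List.min?_eq_none_iff _ _).2 rfl
      have hmax0 : PySem.List.max? ([] : List Int) (fun x => x) = none :=
        (PySem.List.max?_eq_none_iff _ _).2 rfl
      rw [pvShrinkA]
      simp only [hw, hmin0, hmax0]
      simp [pvDeq]
      omega
    · obtain ⟨m, hmh, hm⟩ := pvMinHead _ hw
      obtain ⟨M, hMh, hM⟩ := pvMaxHead _ hw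
      have hslt : start < endi + 1 ∧ start < A.length := by
        have := (pvWin_empty_iff A start (endi+1)).not.1 hw
        constructor <;> omega
      rw [pvShrinkA, pvShrinkB, pvSliceWin]
      simp only [hmh, hMh, hm, hM]
      by_cases hcond : k ≤ M - m
      · simp only [if_pos hcond]
        have hget : A[start]? = some A[start] := List.getElem?_eq_getElem hslt.2
        simp only [hget]
        have hw' : pvWin A start (endi+1) = A[start] :: pvWin A (start+1) (endi+1) :=
          pvWin_cons A start (endi+1) hslt.1 hslt.2
        have hdel_min := pvDeq_delete pvLeMin pvLeMin_tot pvLeMin_tr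
          A[start] (pvWin A (start+1) (endi+1))
        have hdel_max := pvDeq_delete pvLeMax pvLeMax_tot pvLeMax_tr
          A[start] (pvWin A (start+1) (endi+1))
        rw [← hw'] at hdel_min hdel_max
        rw [hmh] at hdel_min
        rw [hMh] at hdel_max
        rw [hdel_min, hdel_max]
        have := ih (if best.1 < (endi : Int) - (start : Int) then
            ((endi : Int) - (start : Int), ((start : Int), (endi : Int) - 1)) else best)
          (start+1) (by omega)
        exact ⟨this.1, by omega, this.2.2⟩
      · simp only [if_neg hcond]
        exact ⟨by trivial, by omega, by omega⟩

theorem pvWin_full (A : List Int) (s i : Nat) (hi : A.length ≤ i) :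
    pvWin A s i = pvWin A s A.length := by
  unfold pvWin
  rw [List.take_of_length_le (by simp; omega), List.take_of_length_le (by simp)]

-- the two outer loops agree
theorem pvLoop_eq (A : List Int) (k : Int) :
    ∀ (l : List Int) (i : Nat), A.drop i = l →
      ∀ (best : Int × (Int × Int)) (start : Nat), start ≤ i → start ≤ A.length →
      pvLoopA A k l i (pvDeq pvLeMin (pvWin A start i), pvDeq pvLeMax (pvWin A start i), best, start)
        = (pvDeq pvLeMin (pvWin A (pvLoopB A k ((List.range A.length).drop i) best start).2 A.length),
           pvDeq pvLeMax (pvWin A (pvLoopB A k ((List.range A.length).drop i) best start).2 A.length),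
           (pvLoopB A k ((List.range A.length).drop i) best start).1,
           (pvLoopB A k ((List.range A.length).drop i) best start).2) := by
  intro l
  induction l with
  | nil =>
    intro i hdrop best start hsi hsn
    have hlen : A.length ≤ i := by
      have := congrArg List.length hdrop
      simp at this; omega
    have hrange : (List.range A.length).drop i = [] := by
      apply List.drop_eq_nil_of_le; simp; omega
    rw [hrange]
    rw [pvWin_full A start i hlen]
    rfl
  | cons e l' ih =>
    intro i hdrop best start hsi hsn
    have hi : i < A.length := by
      by_contra h
      rw [List.drop_eq_nil_of_le (by omega)] at hdrop
      exact List.cons_ne_nil e l' hdrop.symm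
    have he : e = A[i] ∧ A.drop (i+1) = l' := by
      rw [List.drop_eq_getElem_cons hi] at hdrop
      exact ⟨(List.cons.injEq _ _ _ _ ▸ hdrop).1.symm, (List.cons.injEq _ _ _ _ ▸ hdrop).2⟩
    have hrange : (List.range A.length).drop i = i :: (List.range A.length).drop (i+1) := by
      rw [List.drop_eq_getElem_cons (by simpa using hi)]
      simp
    rw [pvLoopA, hrange, pvLoopB]
    rw [he.1, pvPushMin_deq, pvPushMax_deq, ← pvWin_snoc A start i hsi hi]
    obtain ⟨hshr, hle1, hle2⟩ := pvShrink_eq A k i hi A.length best start (by omega)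
    rw [hshr]
    exact ih (i+1) he.2 _ _ hle2 (by omega)

-- ===== VERDICT (by name: the statement is the Claim_ definition above) =====
theorem get_sub_array_any_2_diff_less_than_spec : Claim_equal_get_sub_array_any_2_diff_less_than := by
  intro A k _ _
  unfold Spec_get_sub_array_any_2_diff_less_than
  unfold get_sub_array_any_2_diff_less_than get_sub_array_any_2_diff_less_than_alt
  match A with
  | [] => rfl
  | a :: t =>
    have h0 : pvWin (a :: t) 0 0 = [] := by simp [pvWin]
    have := pvLoop_eq (a :: t) k (a :: t) 0 (by simp) (0, (-1, -1)) 0 (by omega) (by simp)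
    rw [h0] at this
    simp only [List.drop_zero] at this
    have e1 : pvDeq pvLeMin ([] : List Int) = [] := rfl
    have e2 : pvDeq pvLeMax ([] : List Int) = [] := rfl
    rw [e1, e2] at this
    rw [this]
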